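-- pv_equiv track=rewrite | github.com/LIONHOOD/CodingStudy_auto-sync | 프로그래머스/1/42840. 모의고사/모의고사.py | solution
-- ===== SOURCE A (Python) =====
-- def solution(answers):
--     n = len(answers)
--     B = [1,2,3,4,5]
--     C = [2,1,2,3,2,4,2,5]
--     D = [3,3,1,1,2,2,4,4,5,5]
--     L = [0]*3
--     for a,b,c,d in zip(answers,B*(n//len(B)+1),C*(n//len(C)+1),D*(n//len(D)+1)):
--         L[0] += (a==b)
--         L[1] += (a==c)
--         L[2] += (a==d)
--     m = max(L)
--     k = L.count(max(L))
--     answer = sorted([y for x,y in sorted([*zip(L,[1,2,3])], reverse=True)[:k]])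
--     return answer
-- ===== SOURCE B (Python) =====
-- def solution(answers):
--     # Hash index: one pass bucketing answers by (position mod 40, value); 40 = lcm of the
--     # three pattern cycle lengths, so i % 40 determines each pattern's answer at i.
--     cnt = {}
--     for i, a in enumerate(answers):
--         key = (i % 40, a)
--         cnt[key] = cnt.get(key, 0) + 1
--     patterns = [[1, 2, 3, 4, 5],
--                 [2, 1, 2, 3, 2, 4, 2, 5],
--                 [3, 3, 1, 1, 2, 2, 4, 4, 5, 5]]
--     best = 0
--     winners = []
--     for j, p in enumerate(patterns):
--         s = sum(cnt.get((r, p[r % len(p)]), 0) for r in range(40))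
--         if s > best:
--             best = s
--             winners = [j + 1]
--         elif s == best:
--             winners.append(j + 1)
--     return winners
-- ===== Notes on version B (the rewrite author's own statement) =====
-- stated objective: alternative
-- what changed: B replaces A's single merged zip over pre-replicated pattern lists and its sort-descending/slice-k/re-sort selection by a hash index: one pass builds a dict counting (position mod 40, answer) pairs (40 = lcm of the cycle lengths), each supervisor's score is then read off 40 dict lookups without rescanning the answers, and winners are kept with a running best/winners accumulator.
import Mathlib
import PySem

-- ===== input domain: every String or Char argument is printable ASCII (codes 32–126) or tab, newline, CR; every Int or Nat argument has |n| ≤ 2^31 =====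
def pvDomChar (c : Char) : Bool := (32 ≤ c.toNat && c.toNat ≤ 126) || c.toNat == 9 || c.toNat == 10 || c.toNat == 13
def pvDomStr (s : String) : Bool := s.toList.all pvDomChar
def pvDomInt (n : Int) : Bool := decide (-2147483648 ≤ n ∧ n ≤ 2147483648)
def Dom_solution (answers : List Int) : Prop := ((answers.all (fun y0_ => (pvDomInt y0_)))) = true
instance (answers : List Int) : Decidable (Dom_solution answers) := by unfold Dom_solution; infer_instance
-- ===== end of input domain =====

-- B builds a hash index (dict) keyed by (position mod 40, value) in one pass — 40 = lcm of
-- the three pattern cycle lengths — then reads each supervisor's score off 40 dict lookups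
-- and keeps a running best/winners pair, instead of A's four-way zip over pre-replicated
-- pattern lists and its sort-descending/slice/re-sort selection (objective: alternative).

-- ===== PORT A =====
def solution (answers : List Int) : List Int :=
  let n : Int := (answers.length : Int)
  let B : List Int := [1,2,3,4,5]
  let C : List Int := [2,1,2,3,2,4,2,5]
  let D : List Int := [3,3,1,1,2,2,4,4,5,5]
  -- zip(answers, B*(n//5+1), C*(n//8+1), D*(n//10+1)) as nested pairs
  let quads := answers.zip ((PySem.List.pyRepeat B (PySem.Int.floordiv n (B.length : Int) + 1)).zip
      ((PySem.List.pyRepeat C (PySem.Int.floordiv n (C.length : Int) + 1)).zip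
       (PySem.List.pyRepeat D (PySem.Int.floordiv n (D.length : Int) + 1))))
  let L := quads.foldl (fun (L : Int × Int × Int) q =>
      (L.1 + (if q.1 = q.2.1 then (1:Int) else 0),
       L.2.1 + (if q.1 = q.2.2.1 then (1:Int) else 0),
       L.2.2 + (if q.1 = q.2.2.2 then (1:Int) else 0))) (0, 0, 0)
  let Ll : List Int := [L.1, L.2.1, L.2.2]
  let m := (PySem.List.max? Ll (fun v => v)).getD 0   -- Ll has 3 elements, so max? is never none
  let k := PySem.List.count Ll m
  let top := (PySem.List.sorted2 (Ll.zip [(1:Int),2,3]) (fun p => p.1) (fun p => p.2) true).take k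
  PySem.List.sorted (top.map (fun p => p.2)) (fun y => y) false

-- ===== PORT B =====
-- cnt[(i % 40, a)] += 1, built by one pass over enumerate(answers)
def pvCnt (answers : List Int) : PySem.Dict (Int × Int) Int :=
  (PySem.List.enumerate answers 0).foldl
    (fun d ia => d.insert (PySem.Int.mod ia.1 40, ia.2)
                          (d.getD (PySem.Int.mod ia.1 40, ia.2) 0 + 1))
    PySem.Dict.empty

-- sum(cnt.get((r, p[r % len(p)]), 0) for r in range(40)); 0 ≤ r % len(p) < len(p), so
-- Python's p[r % len(p)] never raises and pyGetD is exact here.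
def pvScoreOf (cnt : PySem.Dict (Int × Int) Int) (p : List Int) : Int :=
  (PySem.List.pyRange 0 40 1).foldl
    (fun acc r => acc + cnt.getD (r, PySem.List.pyGetD p (PySem.Int.mod r (p.length : Int)) 0) 0) 0

def solution_alt (answers : List Int) : List Int :=
  let cnt := pvCnt answers
  let patterns : List (List Int) := [[1,2,3,4,5],[2,1,2,3,2,4,2,5],[3,3,1,1,2,2,4,4,5,5]]
  ((PySem.List.enumerate patterns 0).foldl
    (fun (st : Int × List Int) jp =>
      let s := pvScoreOf cnt jp.2
      if st.1 < s then (s, [jp.1 + 1])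
      else if s = st.1 then (st.1, st.2 ++ [jp.1 + 1])
      else st)
    (0, [])).2

-- ===== PRECONDITION & SPEC =====
def Spec_solution (answers : List Int) (out : List Int) : Prop := out = solution_alt answers
instance (answers : List Int) (out : List Int) : Decidable (Spec_solution answers out) := by unfold Spec_solution; infer_instance

-- ===== CLAIM (what is proved, stated in full; the proofs are below) =====
def Claim_equal_solution : Prop := ∀ (answers : List Int), Dom_solution answers → Spec_solution answers (solution answers)

-- ===== LEMMAS AND PROOFS =====

theorem pv_getD_flatten_replicate {α : Type} (p : List α) (d : α) :
    ∀ (k i : Nat), i < k * p.length →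
      ((List.replicate k p).flatten).getD i d = p.getD (i % p.length) d := by
  intro k
  induction k with
  | zero => intro i h; simp at h
  | succ k ih =>
    intro i h
    simp only [List.replicate_succ, List.flatten_cons]
    by_cases hi : i < p.length
    · rw [List.getD_append _ _ _ _ hi, Nat.mod_eq_of_lt hi]
    · have hple : p.length ≤ i := le_of_not_gt hi
      rw [List.getD_append_right _ _ _ _ hple, ih (i - p.length) (by rw [Nat.succ_mul] at h; omega)]
      have hsplit : i = (i - p.length) + p.length := by omega
      conv_rhs => rw [hsplit, Nat.add_mod_right]

theorem pv_length_pyRepeat_ge (p : List Int) (n : Nat) (hp : 0 < p.length) :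
    n ≤ (PySem.List.pyRepeat p (PySem.Int.floordiv (n : Int) (p.length : Int) + 1)).length ∧
      (PySem.List.pyRepeat p (PySem.Int.floordiv (n : Int) (p.length : Int) + 1)).length
        = (n / p.length + 1) * p.length := by
  have hk : (PySem.Int.floordiv (n : Int) (p.length : Int) + 1).toNat = n / p.length + 1 := by
    rw [PySem.Int.floordiv_natCast]
    exact_mod_cast rfl
  have hlen : (PySem.List.pyRepeat p (PySem.Int.floordiv (n : Int) (p.length : Int) + 1)).length
      = (n / p.length + 1) * p.length := by
    simp only [PySem.List.pyRepeat, List.length_flatten, hk, List.map_replicate,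
      List.sum_replicate, smul_eq_mul]
  refine ⟨?_, hlen⟩
  rw [hlen, Nat.add_mul, Nat.one_mul]
  have := Nat.div_add_mod' n p.length
  have := Nat.mod_lt n hp
  omega

-- the element of p * (n//len(p)+1) at i (< n) is p[i % len(p)], as pyGetD with an Int index
theorem pv_pyRepeat_getD (p : List Int) (n i : Nat) (hp : 0 < p.length) (hi : i < n)
    (h' : i < (PySem.List.pyRepeat p (PySem.Int.floordiv (n : Int) (p.length : Int) + 1)).length) :
    (PySem.List.pyRepeat p (PySem.Int.floordiv (n : Int) (p.length : Int) + 1))[i]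
      = PySem.List.pyGetD p (PySem.Int.mod (i : Int) (p.length : Int)) 0 := by
  obtain ⟨hge, hlen⟩ := pv_length_pyRepeat_ge p n hp
  rw [← List.getD_eq_getElem _ 0 h']
  have hk : (PySem.Int.floordiv (n : Int) (p.length : Int) + 1).toNat = n / p.length + 1 := by
    rw [PySem.Int.floordiv_natCast]
    exact_mod_cast rfl
  rw [show PySem.List.pyRepeat p (PySem.Int.floordiv (n : Int) (p.length : Int) + 1)
        = (List.replicate (n / p.length + 1) p).flatten by
      simp only [PySem.List.pyRepeat]; rw [hk]]
  rw [pv_getD_flatten_replicate p 0 _ i (by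
    rw [Nat.add_mul, Nat.one_mul]
    have := Nat.div_add_mod' n p.length
    have := Nat.mod_lt n hp
    omega)]
  rw [PySem.Int.mod_natCast, PySem.List.pyGetD_natCast]

-- A's zipped quadruples, rewritten as a map over enumerate(answers)
theorem pv_quads_eq (xs : List Int) :
    xs.zip ((PySem.List.pyRepeat ([1,2,3,4,5] : List Int)
        (PySem.Int.floordiv (xs.length : Int) ((List.length ([1,2,3,4,5] : List Int) : Nat) : Int) + 1)).zip
      ((PySem.List.pyRepeat ([2,1,2,3,2,4,2,5] : List Int)
        (PySem.Int.floordiv (xs.length : Int) ((List.length ([2,1,2,3,2,4,2,5] : List Int) : Nat) : Int) + 1)).zip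
       (PySem.List.pyRepeat ([3,3,1,1,2,2,4,4,5,5] : List Int)
        (PySem.Int.floordiv (xs.length : Int) ((List.length ([3,3,1,1,2,2,4,4,5,5] : List Int) : Nat) : Int) + 1))))
    = (PySem.List.enumerate xs 0).map (fun ia =>
        (ia.2, (PySem.List.pyGetD ([1,2,3,4,5] : List Int)
            (PySem.Int.mod ia.1 ((List.length ([1,2,3,4,5] : List Int) : Nat) : Int)) 0,
          (PySem.List.pyGetD ([2,1,2,3,2,4,2,5] : List Int)
            (PySem.Int.mod ia.1 ((List.length ([2,1,2,3,2,4,2,5] : List Int) : Nat) : Int)) 0,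
           PySem.List.pyGetD ([3,3,1,1,2,2,4,4,5,5] : List Int)
            (PySem.Int.mod ia.1 ((List.length ([3,3,1,1,2,2,4,4,5,5] : List Int) : Nat) : Int)) 0)))) := by
  obtain ⟨g1, -⟩ := pv_length_pyRepeat_ge ([1,2,3,4,5] : List Int) xs.length (by simp)
  obtain ⟨g2, -⟩ := pv_length_pyRepeat_ge ([2,1,2,3,2,4,2,5] : List Int) xs.length (by simp)
  obtain ⟨g3, -⟩ := pv_length_pyRepeat_ge ([3,3,1,1,2,2,4,4,5,5] : List Int) xs.length (by simp)
  apply List.ext_getElem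
  · rw [List.length_map, PySem.List.length_enumerate]
    simp only [List.length_zip]
    exact Nat.min_eq_left (Nat.le_min.mpr ⟨g1, Nat.le_min.mpr ⟨g2, g3⟩⟩)
  · intro i hL hR
    have hi : i < xs.length := by
      simp only [List.length_zip] at hL
      exact hL.trans_le (min_le_left _ _)
    simp only [List.getElem_zip, List.getElem_map]
    rw [PySem.List.getElem_enumerate xs 0 i (by rw [PySem.List.length_enumerate]; exact hi)]
    rw [pv_pyRepeat_getD ([1,2,3,4,5] : List Int) xs.length i (by simp) hi]
    rw [pv_pyRepeat_getD ([2,1,2,3,2,4,2,5] : List Int) xs.length i (by simp) hi]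
    rw [pv_pyRepeat_getD ([3,3,1,1,2,2,4,4,5,5] : List Int) xs.length i (by simp) hi]
    simp

-- cnt.get((r,v), 0) counts the enumerate pairs mapping to the key (r, v)
theorem pv_cnt_getD (answers : List Int) (v : Int × Int) :
    (pvCnt answers).getD v 0
      = ((PySem.List.enumerate answers 0).map (fun ia => (PySem.Int.mod ia.1 40, ia.2))).count v := by
  unfold pvCnt
  rw [← List.foldl_map (f := fun ia : Int × Int => (PySem.Int.mod ia.1 40, ia.2))
        (g := fun (d : PySem.Dict (Int × Int) Int) x => d.insert x (d.getD x 0 + 1))]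
  rw [PySem.Dict.getD_foldl_insert_add_one]
  simp [PySem.Dict.empty, PySem.Dict.getD, PySem.Dict.get?]

-- a 0/1 partition: if each x of l satisfies P r x for exactly [Q x] many r of rs,
-- the per-r counts sum to the Q-count
theorem pv_partition {α : Type} (rs : List Int) (P : Int → α → Bool) (Q : α → Bool) :
    ∀ (l : List α), (∀ x ∈ l, (rs.countP (fun r => P r x) : Int) = if Q x then 1 else 0) →
      (rs.map (fun r => ((l.countP (P r)) : Int))).sum = (l.countP Q : Int) := by
  intro l
  induction l with
  | nil => simp
  | cons x t ih =>
    intro h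
    simp only [List.countP_cons]
    push_cast
    have : (rs.map (fun r => ((t.countP (P r)) : Int) + (if P r x then 1 else 0))).sum
        = (rs.map (fun r => ((t.countP (P r)) : Int))).sum
          + (rs.map (fun r => if P r x then (1:Int) else 0)).sum :=
      PySem.List.sum_map_add_int rs _ _
    rw [this, ih (fun y hy => h y (List.mem_cons_of_mem _ hy)),
        PySem.List.sum_map_ite_one_zero, h x List.mem_cons_self]

-- counting a single value in a duplicate-free list, under an extra flag
theorem pv_countP_single (rs : List Int) (c : Int) (b : Bool) (hn : rs.Nodup) (hc : c ∈ rs) :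
    rs.countP (fun r => decide (r = c) && b) = if b then 1 else 0 := by
  cases b with
  | false => simp
  | true =>
    simp only [Bool.and_true, if_pos]
    have : rs.countP (fun r => decide (r = c)) = rs.count c := by
      simp [List.count, BEq.beq]
    rw [this, List.count_eq_one_of_mem hn hc]

-- B's 40 lookups are A's per-pattern hit count (len p divides 40, p nonempty)
theorem pv_score_eq (answers p : List Int) (hp : 0 < p.length) (hd : (p.length : Int) ∣ 40) :
    pvScoreOf (pvCnt answers) p
      = ((PySem.List.enumerate answers 0).countP
          (fun ia => decide (ia.2 = PySem.List.pyGetD p (PySem.Int.mod ia.1 (p.length : Int)) 0)) : Int) := by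
  have hlp : (0:Int) < (p.length : Int) := by exact_mod_cast hp
  unfold pvScoreOf
  rw [PySem.List.foldl_add, zero_add]
  have hcnt : ∀ r : Int,
      (pvCnt answers).getD (r, PySem.List.pyGetD p (PySem.Int.mod r (p.length : Int)) 0) 0
        = ((PySem.List.enumerate answers 0).countP
            (fun ia => decide (PySem.Int.mod ia.1 40 = r)
              && decide (ia.2 = PySem.List.pyGetD p (PySem.Int.mod r (p.length : Int)) 0)) : Int) := by
    intro r
    rw [pv_cnt_getD, List.count_eq_countP, List.countP_map]
    congr 1
  calc ((PySem.List.pyRange 0 40 1).map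
          (fun r => (pvCnt answers).getD (r, PySem.List.pyGetD p (PySem.Int.mod r (p.length : Int)) 0) 0)).sum
      = ((PySem.List.pyRange 0 40 1).map
          (fun r => ((PySem.List.enumerate answers 0).countP
            (fun ia => decide (PySem.Int.mod ia.1 40 = r)
              && decide (ia.2 = PySem.List.pyGetD p (PySem.Int.mod ia.1 (p.length : Int)) 0)) : Int))).sum := by
        apply congrArg
        apply List.map_congr_left
        intro r hr
        rw [hcnt r]
        congr 1
        apply List.countP_congr
        intro ia hia
        obtain ⟨k, hk, rfl⟩ := (PySem.List.mem_enumerate_iff answers 0 ia).mp hia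
        simp only [zero_add]
        constructor
        · intro h
          have h1 := (Bool.and_eq_true _ _).mp h
          have hm : PySem.Int.mod (k : Int) 40 = r := of_decide_eq_true h1.1
          have : PySem.Int.mod (k : Int) (p.length : Int) = PySem.Int.mod r (p.length : Int) := by
            rw [← hm]
            simp only [PySem.Int.mod_eq_emod_of_pos hlp,
              PySem.Int.mod_eq_emod_of_pos (show (0:Int) < 40 by omega)]
            rw [Int.emod_emod_of_dvd _ hd]
          rw [Bool.and_eq_true]
          exact ⟨h1.1, by rw [this]; exact h1.2⟩
        · intro h
          have h1 := (Bool.and_eq_true _ _).mp h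
          have hm : PySem.Int.mod (k : Int) 40 = r := of_decide_eq_true h1.1
          have : PySem.Int.mod (k : Int) (p.length : Int) = PySem.Int.mod r (p.length : Int) := by
            rw [← hm]
            simp only [PySem.Int.mod_eq_emod_of_pos hlp,
              PySem.Int.mod_eq_emod_of_pos (show (0:Int) < 40 by omega)]
            rw [Int.emod_emod_of_dvd _ hd]
          rw [Bool.and_eq_true]
          exact ⟨h1.1, by rw [← this]; exact h1.2⟩
    _ = _ := by
        apply pv_partition
        intro ia hia
        obtain ⟨k, hk, rfl⟩ := (PySem.List.mem_enumerate_iff answers 0 ia).mp hia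
        simp only [zero_add]
        rw [show (fun r => decide (PySem.Int.mod (k : Int) 40 = r)
              && decide ((answers[k] : Int) = PySem.List.pyGetD p (PySem.Int.mod (k : Int) (p.length : Int)) 0))
            = (fun r => decide (r = PySem.Int.mod (k : Int) 40)
              && decide ((answers[k] : Int) = PySem.List.pyGetD p (PySem.Int.mod (k : Int) (p.length : Int)) 0)) by
          funext r; simp [eq_comm]]
        have hone := pv_countP_single (PySem.List.pyRange 0 40 1) (PySem.Int.mod (k : Int) 40)
          (decide ((answers[k]'hk : Int) = PySem.List.pyGetD p (PySem.Int.mod (k : Int) (p.length : Int)) 0))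
          (PySem.List.nodup_pyRange_one 0 40)
          ((PySem.List.mem_pyRange_one).mpr
            ⟨PySem.Int.mod_nonneg _ (by omega), PySem.Int.mod_lt ((k : Int)) (by omega)⟩)
        rw [hone]
        split_ifs <;> simp

-- selection: A's sort-descending/slice-k/re-sort on three nonnegative scores equals
-- B's running best/winners loop, proved by total case analysis on the score order
set_option maxRecDepth 4096 in
set_option maxHeartbeats 2000000 in
theorem pv_sel_a (x y z : Int) (hx : 0 ≤ x) (hy : 0 ≤ y) (hz : 0 ≤ z) (h1 : x < y) (h3 : y < z) :
    (PySem.List.sorted (((PySem.List.sorted2 (([x,y,z] : List Int).zip [(1:Int),2,3])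
        (fun p => p.1) (fun p => p.2) true).take
          (PySem.List.count ([x,y,z] : List Int) ((PySem.List.max? ([x,y,z] : List Int) (fun v => v)).getD 0))).map
        (fun p => p.2)) (fun y => y) false)
    = (((PySem.List.enumerate ([x,y,z] : List Int) 0).foldl
        (fun (st : Int × List Int) js =>
          if st.1 < js.2 then (js.2, [js.1 + 1])
          else if js.2 = st.1 then (st.1, st.2 ++ [js.1 + 1])
          else st) (0, [])).2) := by
  have h2 : x < z := h1.trans h3
  simp only [PySem.List.enumerate_cons, PySem.List.enumerate_nil, List.foldl_cons,
    PySem.List.sorted2, PySem.List.sorted, PySem.List.max?, PySem.List.count, List.count_cons,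
    PySem.List.insertBy, List.zip, List.zipWith, List.foldl]
  norm_num [h1, not_lt.mpr h1.le, h1.ne, h1.ne', h2, not_lt.mpr h2.le, h2.ne, h2.ne', h3, not_lt.mpr h3.le, h3.ne, h3.ne']
  split_ifs <;> dsimp only at * <;> simp_all [PySem.List.insertBy, h1, not_lt.mpr h1.le, h1.ne, h1.ne', h2, not_lt.mpr h2.le, h2.ne, h2.ne', h3, not_lt.mpr h3.le, h3.ne, h3.ne'] <;>
    first | omega | (split_ifs <;> simp_all [PySem.List.insertBy] <;> omega)

set_option maxRecDepth 4096 in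
set_option maxHeartbeats 2000000 in
theorem pv_sel_b (x y z : Int) (hx : 0 ≤ x) (hy : 0 ≤ y) (hz : 0 ≤ z) (h1 : x < y) (h3 : y = z) :
    (PySem.List.sorted (((PySem.List.sorted2 (([x,y,z] : List Int).zip [(1:Int),2,3])
        (fun p => p.1) (fun p => p.2) true).take
          (PySem.List.count ([x,y,z] : List Int) ((PySem.List.max? ([x,y,z] : List Int) (fun v => v)).getD 0))).map
        (fun p => p.2)) (fun y => y) false)
    = (((PySem.List.enumerate ([x,y,z] : List Int) 0).foldl
        (fun (st : Int × List Int) js =>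
          if st.1 < js.2 then (js.2, [js.1 + 1])
          else if js.2 = st.1 then (st.1, st.2 ++ [js.1 + 1])
          else st) (0, [])).2) := by
  subst h3
  simp only [PySem.List.enumerate_cons, PySem.List.enumerate_nil, List.foldl_cons,
    PySem.List.sorted2, PySem.List.sorted, PySem.List.max?, PySem.List.count, List.count_cons,
    PySem.List.insertBy, List.zip, List.zipWith, List.foldl]
  norm_num [h1, not_lt.mpr h1.le, h1.ne, h1.ne']
  split_ifs <;> dsimp only at * <;> simp_all [PySem.List.insertBy, h1, not_lt.mpr h1.le, h1.ne, h1.ne'] <;>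
    first | omega | (split_ifs <;> simp_all [PySem.List.insertBy] <;> omega)

set_option maxRecDepth 4096 in
set_option maxHeartbeats 2000000 in
theorem pv_sel_c (x y z : Int) (hx : 0 ≤ x) (hy : 0 ≤ y) (hz : 0 ≤ z) (h1 : x < y) (h3 : z < y) (h2 : x < z) :
    (PySem.List.sorted (((PySem.List.sorted2 (([x,y,z] : List Int).zip [(1:Int),2,3])
        (fun p => p.1) (fun p => p.2) true).take
          (PySem.List.count ([x,y,z] : List Int) ((PySem.List.max? ([x,y,z] : List Int) (fun v => v)).getD 0))).map
        (fun p => p.2)) (fun y => y) false)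
    = (((PySem.List.enumerate ([x,y,z] : List Int) 0).foldl
        (fun (st : Int × List Int) js =>
          if st.1 < js.2 then (js.2, [js.1 + 1])
          else if js.2 = st.1 then (st.1, st.2 ++ [js.1 + 1])
          else st) (0, [])).2) := by
  simp only [PySem.List.enumerate_cons, PySem.List.enumerate_nil, List.foldl_cons,
    PySem.List.sorted2, PySem.List.sorted, PySem.List.max?, PySem.List.count, List.count_cons,
    PySem.List.insertBy, List.zip, List.zipWith, List.foldl]
  norm_num [h1, not_lt.mpr h1.le, h1.ne, h1.ne', h2, not_lt.mpr h2.le, h2.ne, h2.ne', h3, not_lt.mpr h3.le, h3.ne, h3.ne']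
  split_ifs <;> dsimp only at * <;> simp_all [PySem.List.insertBy, h1, not_lt.mpr h1.le, h1.ne, h1.ne', h2, not_lt.mpr h2.le, h2.ne, h2.ne', h3, not_lt.mpr h3.le, h3.ne, h3.ne'] <;>
    first | omega | (split_ifs <;> simp_all [PySem.List.insertBy] <;> omega)

set_option maxRecDepth 4096 in
set_option maxHeartbeats 2000000 in
theorem pv_sel_d (x y z : Int) (hx : 0 ≤ x) (hy : 0 ≤ y) (hz : 0 ≤ z) (h1 : x < y) (h3 : z < y) (h2 : x = z) :
    (PySem.List.sorted (((PySem.List.sorted2 (([x,y,z] : List Int).zip [(1:Int),2,3])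
        (fun p => p.1) (fun p => p.2) true).take
          (PySem.List.count ([x,y,z] : List Int) ((PySem.List.max? ([x,y,z] : List Int) (fun v => v)).getD 0))).map
        (fun p => p.2)) (fun y => y) false)
    = (((PySem.List.enumerate ([x,y,z] : List Int) 0).foldl
        (fun (st : Int × List Int) js =>
          if st.1 < js.2 then (js.2, [js.1 + 1])
          else if js.2 = st.1 then (st.1, st.2 ++ [js.1 + 1])
          else st) (0, [])).2) := by
  subst h2
  simp only [PySem.List.enumerate_cons, PySem.List.enumerate_nil, List.foldl_cons,
    PySem.List.sorted2, PySem.List.sorted, PySem.List.max?, PySem.List.count, List.count_cons,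
    PySem.List.insertBy, List.zip, List.zipWith, List.foldl]
  norm_num [h1, not_lt.mpr h1.le, h1.ne, h1.ne', h3, not_lt.mpr h3.le, h3.ne, h3.ne']
  split_ifs <;> dsimp only at * <;> simp_all [PySem.List.insertBy, h1, not_lt.mpr h1.le, h1.ne, h1.ne', h3, not_lt.mpr h3.le, h3.ne, h3.ne'] <;>
    first | omega | (split_ifs <;> simp_all [PySem.List.insertBy] <;> omega)

set_option maxRecDepth 4096 in
set_option maxHeartbeats 2000000 in
theorem pv_sel_e (x y z : Int) (hx : 0 ≤ x) (hy : 0 ≤ y) (hz : 0 ≤ z) (h1 : x < y) (h3 : z < y) (h2 : z < x) :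
    (PySem.List.sorted (((PySem.List.sorted2 (([x,y,z] : List Int).zip [(1:Int),2,3])
        (fun p => p.1) (fun p => p.2) true).take
          (PySem.List.count ([x,y,z] : List Int) ((PySem.List.max? ([x,y,z] : List Int) (fun v => v)).getD 0))).map
        (fun p => p.2)) (fun y => y) false)
    = (((PySem.List.enumerate ([x,y,z] : List Int) 0).foldl
        (fun (st : Int × List Int) js =>
          if st.1 < js.2 then (js.2, [js.1 + 1])
          else if js.2 = st.1 then (st.1, st.2 ++ [js.1 + 1])
          else st) (0, [])).2) := by
  simp only [PySem.List.enumerate_cons, PySem.List.enumerate_nil, List.foldl_cons,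
    PySem.List.sorted2, PySem.List.sorted, PySem.List.max?, PySem.List.count, List.count_cons,
    PySem.List.insertBy, List.zip, List.zipWith, List.foldl]
  norm_num [h1, not_lt.mpr h1.le, h1.ne, h1.ne', h2, not_lt.mpr h2.le, h2.ne, h2.ne', h3, not_lt.mpr h3.le, h3.ne, h3.ne']
  split_ifs <;> dsimp only at * <;> simp_all [PySem.List.insertBy, h1, not_lt.mpr h1.le, h1.ne, h1.ne', h2, not_lt.mpr h2.le, h2.ne, h2.ne', h3, not_lt.mpr h3.le, h3.ne, h3.ne'] <;>
    first | omega | (split_ifs <;> simp_all [PySem.List.insertBy] <;> omega)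

set_option maxRecDepth 4096 in
set_option maxHeartbeats 2000000 in
theorem pv_sel_f (x y z : Int) (hx : 0 ≤ x) (hy : 0 ≤ y) (hz : 0 ≤ z) (h1 : x = y) (h2 : x < z) :
    (PySem.List.sorted (((PySem.List.sorted2 (([x,y,z] : List Int).zip [(1:Int),2,3])
        (fun p => p.1) (fun p => p.2) true).take
          (PySem.List.count ([x,y,z] : List Int) ((PySem.List.max? ([x,y,z] : List Int) (fun v => v)).getD 0))).map
        (fun p => p.2)) (fun y => y) false)
    = (((PySem.List.enumerate ([x,y,z] : List Int) 0).foldl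
        (fun (st : Int × List Int) js =>
          if st.1 < js.2 then (js.2, [js.1 + 1])
          else if js.2 = st.1 then (st.1, st.2 ++ [js.1 + 1])
          else st) (0, [])).2) := by
  subst h1
  simp only [PySem.List.enumerate_cons, PySem.List.enumerate_nil, List.foldl_cons,
    PySem.List.sorted2, PySem.List.sorted, PySem.List.max?, PySem.List.count, List.count_cons,
    PySem.List.insertBy, List.zip, List.zipWith, List.foldl]
  norm_num [h2, not_lt.mpr h2.le, h2.ne, h2.ne']
  split_ifs <;> dsimp only at * <;> simp_all [PySem.List.insertBy, h2, not_lt.mpr h2.le, h2.ne, h2.ne'] <;>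
    first | omega | (split_ifs <;> simp_all [PySem.List.insertBy] <;> omega)

set_option maxRecDepth 4096 in
set_option maxHeartbeats 2000000 in
theorem pv_sel_g (x y z : Int) (hx : 0 ≤ x) (hy : 0 ≤ y) (hz : 0 ≤ z) (h1 : x = y) (h2 : x = z) :
    (PySem.List.sorted (((PySem.List.sorted2 (([x,y,z] : List Int).zip [(1:Int),2,3])
        (fun p => p.1) (fun p => p.2) true).take
          (PySem.List.count ([x,y,z] : List Int) ((PySem.List.max? ([x,y,z] : List Int) (fun v => v)).getD 0))).map
        (fun p => p.2)) (fun y => y) false)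
    = (((PySem.List.enumerate ([x,y,z] : List Int) 0).foldl
        (fun (st : Int × List Int) js =>
          if st.1 < js.2 then (js.2, [js.1 + 1])
          else if js.2 = st.1 then (st.1, st.2 ++ [js.1 + 1])
          else st) (0, [])).2) := by
  subst h1
  subst h2
  simp only [PySem.List.enumerate_cons, PySem.List.enumerate_nil, List.foldl_cons,
    PySem.List.sorted2, PySem.List.sorted, PySem.List.max?, PySem.List.count, List.count_cons,
    PySem.List.insertBy, List.zip, List.zipWith, List.foldl]
  norm_num
  split_ifs <;> dsimp only at * <;> simp_all [PySem.List.insertBy] <;>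
    first | omega | (split_ifs <;> simp_all [PySem.List.insertBy] <;> omega)

set_option maxRecDepth 4096 in
set_option maxHeartbeats 2000000 in
theorem pv_sel_h (x y z : Int) (hx : 0 ≤ x) (hy : 0 ≤ y) (hz : 0 ≤ z) (h1 : x = y) (h2 : z < x) :
    (PySem.List.sorted (((PySem.List.sorted2 (([x,y,z] : List Int).zip [(1:Int),2,3])
        (fun p => p.1) (fun p => p.2) true).take
          (PySem.List.count ([x,y,z] : List Int) ((PySem.List.max? ([x,y,z] : List Int) (fun v => v)).getD 0))).map
        (fun p => p.2)) (fun y => y) false)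
    = (((PySem.List.enumerate ([x,y,z] : List Int) 0).foldl
        (fun (st : Int × List Int) js =>
          if st.1 < js.2 then (js.2, [js.1 + 1])
          else if js.2 = st.1 then (st.1, st.2 ++ [js.1 + 1])
          else st) (0, [])).2) := by
  subst h1
  simp only [PySem.List.enumerate_cons, PySem.List.enumerate_nil, List.foldl_cons,
    PySem.List.sorted2, PySem.List.sorted, PySem.List.max?, PySem.List.count, List.count_cons,
    PySem.List.insertBy, List.zip, List.zipWith, List.foldl]
  norm_num [h2, not_lt.mpr h2.le, h2.ne, h2.ne']
  split_ifs <;> dsimp only at * <;> simp_all [PySem.List.insertBy, h2, not_lt.mpr h2.le, h2.ne, h2.ne'] <;>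
    first | omega | (split_ifs <;> simp_all [PySem.List.insertBy] <;> omega)

set_option maxRecDepth 4096 in
set_option maxHeartbeats 2000000 in
theorem pv_sel_i (x y z : Int) (hx : 0 ≤ x) (hy : 0 ≤ y) (hz : 0 ≤ z) (h1 : y < x) (h2 : x < z) :
    (PySem.List.sorted (((PySem.List.sorted2 (([x,y,z] : List Int).zip [(1:Int),2,3])
        (fun p => p.1) (fun p => p.2) true).take
          (PySem.List.count ([x,y,z] : List Int) ((PySem.List.max? ([x,y,z] : List Int) (fun v => v)).getD 0))).map
        (fun p => p.2)) (fun y => y) false)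
    = (((PySem.List.enumerate ([x,y,z] : List Int) 0).foldl
        (fun (st : Int × List Int) js =>
          if st.1 < js.2 then (js.2, [js.1 + 1])
          else if js.2 = st.1 then (st.1, st.2 ++ [js.1 + 1])
          else st) (0, [])).2) := by
  have h3 : y < z := h1.trans h2
  simp only [PySem.List.enumerate_cons, PySem.List.enumerate_nil, List.foldl_cons,
    PySem.List.sorted2, PySem.List.sorted, PySem.List.max?, PySem.List.count, List.count_cons,
    PySem.List.insertBy, List.zip, List.zipWith, List.foldl]
  norm_num [h1, not_lt.mpr h1.le, h1.ne, h1.ne', h2, not_lt.mpr h2.le, h2.ne, h2.ne', h3, not_lt.mpr h3.le, h3.ne, h3.ne']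
  split_ifs <;> dsimp only at * <;> simp_all [PySem.List.insertBy, h1, not_lt.mpr h1.le, h1.ne, h1.ne', h2, not_lt.mpr h2.le, h2.ne, h2.ne', h3, not_lt.mpr h3.le, h3.ne, h3.ne'] <;>
    first | omega | (split_ifs <;> simp_all [PySem.List.insertBy] <;> omega)

set_option maxRecDepth 4096 in
set_option maxHeartbeats 2000000 in
theorem pv_sel_j (x y z : Int) (hx : 0 ≤ x) (hy : 0 ≤ y) (hz : 0 ≤ z) (h1 : y < x) (h2 : x = z) :
    (PySem.List.sorted (((PySem.List.sorted2 (([x,y,z] : List Int).zip [(1:Int),2,3])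
        (fun p => p.1) (fun p => p.2) true).take
          (PySem.List.count ([x,y,z] : List Int) ((PySem.List.max? ([x,y,z] : List Int) (fun v => v)).getD 0))).map
        (fun p => p.2)) (fun y => y) false)
    = (((PySem.List.enumerate ([x,y,z] : List Int) 0).foldl
        (fun (st : Int × List Int) js =>
          if st.1 < js.2 then (js.2, [js.1 + 1])
          else if js.2 = st.1 then (st.1, st.2 ++ [js.1 + 1])
          else st) (0, [])).2) := by
  subst h2
  simp only [PySem.List.enumerate_cons, PySem.List.enumerate_nil, List.foldl_cons,
    PySem.List.sorted2, PySem.List.sorted, PySem.List.max?, PySem.List.count, List.count_cons,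
    PySem.List.insertBy, List.zip, List.zipWith, List.foldl]
  norm_num [h1, not_lt.mpr h1.le, h1.ne, h1.ne']
  split_ifs <;> dsimp only at * <;> simp_all [PySem.List.insertBy, h1, not_lt.mpr h1.le, h1.ne, h1.ne'] <;>
    first | omega | (split_ifs <;> simp_all [PySem.List.insertBy] <;> omega)

set_option maxRecDepth 4096 in
set_option maxHeartbeats 2000000 in
theorem pv_sel_k (x y z : Int) (hx : 0 ≤ x) (hy : 0 ≤ y) (hz : 0 ≤ z) (h1 : y < x) (h2 : z < x) (h3 : y < z) :
    (PySem.List.sorted (((PySem.List.sorted2 (([x,y,z] : List Int).zip [(1:Int),2,3])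
        (fun p => p.1) (fun p => p.2) true).take
          (PySem.List.count ([x,y,z] : List Int) ((PySem.List.max? ([x,y,z] : List Int) (fun v => v)).getD 0))).map
        (fun p => p.2)) (fun y => y) false)
    = (((PySem.List.enumerate ([x,y,z] : List Int) 0).foldl
        (fun (st : Int × List Int) js =>
          if st.1 < js.2 then (js.2, [js.1 + 1])
          else if js.2 = st.1 then (st.1, st.2 ++ [js.1 + 1])
          else st) (0, [])).2) := by
  simp only [PySem.List.enumerate_cons, PySem.List.enumerate_nil, List.foldl_cons,
    PySem.List.sorted2, PySem.List.sorted, PySem.List.max?, PySem.List.count, List.count_cons,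
    PySem.List.insertBy, List.zip, List.zipWith, List.foldl]
  norm_num [h1, not_lt.mpr h1.le, h1.ne, h1.ne', h2, not_lt.mpr h2.le, h2.ne, h2.ne', h3, not_lt.mpr h3.le, h3.ne, h3.ne']
  split_ifs <;> dsimp only at * <;> simp_all [PySem.List.insertBy, h1, not_lt.mpr h1.le, h1.ne, h1.ne', h2, not_lt.mpr h2.le, h2.ne, h2.ne', h3, not_lt.mpr h3.le, h3.ne, h3.ne'] <;>
    first | omega | (split_ifs <;> simp_all [PySem.List.insertBy] <;> omega)

set_option maxRecDepth 4096 in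
set_option maxHeartbeats 2000000 in
theorem pv_sel_l (x y z : Int) (hx : 0 ≤ x) (hy : 0 ≤ y) (hz : 0 ≤ z) (h1 : y < x) (h2 : z < x) (h3 : y = z) :
    (PySem.List.sorted (((PySem.List.sorted2 (([x,y,z] : List Int).zip [(1:Int),2,3])
        (fun p => p.1) (fun p => p.2) true).take
          (PySem.List.count ([x,y,z] : List Int) ((PySem.List.max? ([x,y,z] : List Int) (fun v => v)).getD 0))).map
        (fun p => p.2)) (fun y => y) false)
    = (((PySem.List.enumerate ([x,y,z] : List Int) 0).foldl
        (fun (st : Int × List Int) js =>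
          if st.1 < js.2 then (js.2, [js.1 + 1])
          else if js.2 = st.1 then (st.1, st.2 ++ [js.1 + 1])
          else st) (0, [])).2) := by
  subst h3
  simp only [PySem.List.enumerate_cons, PySem.List.enumerate_nil, List.foldl_cons,
    PySem.List.sorted2, PySem.List.sorted, PySem.List.max?, PySem.List.count, List.count_cons,
    PySem.List.insertBy, List.zip, List.zipWith, List.foldl]
  norm_num [h1, not_lt.mpr h1.le, h1.ne, h1.ne', h2, not_lt.mpr h2.le, h2.ne, h2.ne']
  split_ifs <;> dsimp only at * <;> simp_all [PySem.List.insertBy, h1, not_lt.mpr h1.le, h1.ne, h1.ne', h2, not_lt.mpr h2.le, h2.ne, h2.ne'] <;>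
    first | omega | (split_ifs <;> simp_all [PySem.List.insertBy] <;> omega)

set_option maxRecDepth 4096 in
set_option maxHeartbeats 2000000 in
theorem pv_sel_m (x y z : Int) (hx : 0 ≤ x) (hy : 0 ≤ y) (hz : 0 ≤ z) (h1 : y < x) (h2 : z < x) (h3 : z < y) :
    (PySem.List.sorted (((PySem.List.sorted2 (([x,y,z] : List Int).zip [(1:Int),2,3])
        (fun p => p.1) (fun p => p.2) true).take
          (PySem.List.count ([x,y,z] : List Int) ((PySem.List.max? ([x,y,z] : List Int) (fun v => v)).getD 0))).map
        (fun p => p.2)) (fun y => y) false)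
    = (((PySem.List.enumerate ([x,y,z] : List Int) 0).foldl
        (fun (st : Int × List Int) js =>
          if st.1 < js.2 then (js.2, [js.1 + 1])
          else if js.2 = st.1 then (st.1, st.2 ++ [js.1 + 1])
          else st) (0, [])).2) := by
  simp only [PySem.List.enumerate_cons, PySem.List.enumerate_nil, List.foldl_cons,
    PySem.List.sorted2, PySem.List.sorted, PySem.List.max?, PySem.List.count, List.count_cons,
    PySem.List.insertBy, List.zip, List.zipWith, List.foldl]
  norm_num [h1, not_lt.mpr h1.le, h1.ne, h1.ne', h2, not_lt.mpr h2.le, h2.ne, h2.ne', h3, not_lt.mpr h3.le, h3.ne, h3.ne']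
  split_ifs <;> dsimp only at * <;> simp_all [PySem.List.insertBy, h1, not_lt.mpr h1.le, h1.ne, h1.ne', h2, not_lt.mpr h2.le, h2.ne, h2.ne', h3, not_lt.mpr h3.le, h3.ne, h3.ne'] <;>
    first | omega | (split_ifs <;> simp_all [PySem.List.insertBy] <;> omega)

theorem pv_sel (x y z : Int) (hx : 0 ≤ x) (hy : 0 ≤ y) (hz : 0 ≤ z) :
    (PySem.List.sorted (((PySem.List.sorted2 (([x,y,z] : List Int).zip [(1:Int),2,3])
        (fun p => p.1) (fun p => p.2) true).take
          (PySem.List.count ([x,y,z] : List Int) ((PySem.List.max? ([x,y,z] : List Int) (fun v => v)).getD 0))).map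
        (fun p => p.2)) (fun y => y) false)
    = (((PySem.List.enumerate ([x,y,z] : List Int) 0).foldl
        (fun (st : Int × List Int) js =>
          if st.1 < js.2 then (js.2, [js.1 + 1])
          else if js.2 = st.1 then (st.1, st.2 ++ [js.1 + 1])
          else st) (0, [])).2) := by
  rcases lt_trichotomy x y with h1|h1|h1
  · rcases lt_trichotomy y z with h3|h3|h3
    · exact pv_sel_a x y z hx hy hz h1 h3
    · exact pv_sel_b x y z hx hy hz h1 h3
    · rcases lt_trichotomy x z with h2|h2|h2
      · exact pv_sel_c x y z hx hy hz h1 h3 h2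
      · exact pv_sel_d x y z hx hy hz h1 h3 h2
      · exact pv_sel_e x y z hx hy hz h1 h3 h2
  · rcases lt_trichotomy x z with h2|h2|h2
    · exact pv_sel_f x y z hx hy hz h1 h2
    · exact pv_sel_g x y z hx hy hz h1 h2
    · exact pv_sel_h x y z hx hy hz h1 h2
  · rcases lt_trichotomy x z with h2|h2|h2
    · exact pv_sel_i x y z hx hy hz h1 h2
    · exact pv_sel_j x y z hx hy hz h1 h2
    · rcases lt_trichotomy y z with h3|h3|h3
      · exact pv_sel_k x y z hx hy hz h1 h2 h3
      · exact pv_sel_l x y z hx hy hz h1 h2 h3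
      · exact pv_sel_m x y z hx hy hz h1 h2 h3

theorem pv_add_ite (P : Prop) [Decidable P] (acc : Int) :
    acc + (if P then (1:Int) else 0) = if P then acc + 1 else acc := by
  split_ifs <;> omega

-- ===== VERDICT (by name: the statement is the Claim_ definition above) =====
theorem solution_spec : Claim_equal_solution := by
  intro answers _
  simp only [Spec_solution, solution, solution_alt]
  rw [pv_quads_eq answers]
  rw [PySem.List.foldl_prod_mk
       (f := fun (s : Int) (e : Int × Int × Int × Int) => s + (if e.1 = e.2.1 then (1:Int) else 0))
       (g := fun (s : Int × Int) (e : Int × Int × Int × Int) =>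
         (s.1 + (if e.1 = e.2.2.1 then (1:Int) else 0),
          s.2 + (if e.1 = e.2.2.2 then (1:Int) else 0)))]
  rw [PySem.List.foldl_prod_mk
       (f := fun (s : Int) (e : Int × Int × Int × Int) => s + (if e.1 = e.2.2.1 then (1:Int) else 0))
       (g := fun (s : Int) (e : Int × Int × Int × Int) => s + (if e.1 = e.2.2.2 then (1:Int) else 0))]
  simp only [pv_add_ite]
  rw [PySem.List.foldl_ite_add_one (p := fun e : Int × Int × Int × Int => e.1 = e.2.1)]
  rw [PySem.List.foldl_ite_add_one (p := fun e : Int × Int × Int × Int => e.1 = e.2.2.1)]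
  rw [PySem.List.foldl_ite_add_one (p := fun e : Int × Int × Int × Int => e.1 = e.2.2.2)]
  simp only [zero_add, List.countP_map, Function.comp_def]
  try dsimp only
  -- B's three scores are the same three counts
  have e1 := pv_score_eq answers [1,2,3,4,5] (by simp) (by simp)
  have e2 := pv_score_eq answers [2,1,2,3,2,4,2,5] (by simp) (by simp)
  have e3 := pv_score_eq answers [3,3,1,1,2,2,4,4,5,5] (by simp) (by simp)
  rw [← e1, ← e2, ← e3]
  have hsel := pv_sel (pvScoreOf (pvCnt answers) [1,2,3,4,5])
      (pvScoreOf (pvCnt answers) [2,1,2,3,2,4,2,5])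
      (pvScoreOf (pvCnt answers) [3,3,1,1,2,2,4,4,5,5])
      (by rw [e1]; exact Int.natCast_nonneg _)
      (by rw [e2]; exact Int.natCast_nonneg _)
      (by rw [e3]; exact Int.natCast_nonneg _)
  simp only [PySem.List.enumerate_cons, PySem.List.enumerate_nil, List.foldl_cons,
    List.foldl_nil] at hsel ⊢
  exact hsel
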